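-- pv_equiv track=rewrite | github.com/chiting765/LC_Everyday | 1542_Find_Longest_Awesome_Substring.py | longestAwesome
-- ===== SOURCE A (Python) =====
-- def longestAwesome(s: str) -> int:
--     digits = "0123456789"
--     state = 0
--     state_dict = {0:-1}
--     length = 1
--     for index, char in enumerate(s):
--         digit_index = digits.find(char)
--         state ^= 1 << digit_index
--         if state not in state_dict.keys():
--             state_dict[state] = index
--         else:
--             length = max(length, index-state_dict[state]+1)
--
--         state_copy = state
--
--         # just vary the state by 1 digit and see whether there is a match
--         for i in range(10):
--             if str(i) != char:
--                 state_copy ^= 1 << i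
--                 if state_copy in state_dict.keys():
--                     length = max(length, index-state_dict[state_copy])
--                 state_copy = state
--
--     return min(length,len(s))
-- ===== SOURCE B (Python) =====
-- def longestAwesome(s: str) -> int:
--     n = len(s)
--     best = 0
--     for i in range(n):
--         mask = 0
--         for j in range(i, n):
--             mask ^= 1 << int(s[j])
--             if mask & (mask - 1) == 0:
--                 best = max(best, j - i + 1)
--     return best
-- ===== Notes on version B (the rewrite author's own statement) =====
-- stated objective: simpler
-- what changed: Replaces the single prefix-XOR pass with a first-seen dict and 10-way flip enumeration by a plain brute-force double loop that toggles a digit-parity mask per start index and tests awesomeness directly with mask & (mask-1) == 0.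
import Mathlib
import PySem

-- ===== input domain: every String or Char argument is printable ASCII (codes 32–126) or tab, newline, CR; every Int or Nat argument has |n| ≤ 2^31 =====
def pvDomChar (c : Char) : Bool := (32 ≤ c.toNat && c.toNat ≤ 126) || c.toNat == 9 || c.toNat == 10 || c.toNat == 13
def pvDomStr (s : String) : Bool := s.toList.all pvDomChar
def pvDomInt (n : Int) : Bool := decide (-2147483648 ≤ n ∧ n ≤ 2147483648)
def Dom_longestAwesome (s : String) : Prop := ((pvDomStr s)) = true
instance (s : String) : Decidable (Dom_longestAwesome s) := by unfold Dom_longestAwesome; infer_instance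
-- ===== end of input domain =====

-- B replaces A's prefix-XOR pass with first-seen dict and 10-way flip enumeration by a
-- plain brute-force double loop testing each start's parity mask with mask & (mask-1) == 0.

-- Python `a << d` for d ≥ 0; Python raises ValueError for d < 0 (reached only on
-- non-digit characters, which Pre_ excludes); the 0 branch is junk outside Pre_.
def pvShl (a d : Int) : Int := if 0 ≤ d then a * 2 ^ d.toNat else 0

-- ===== PORT A =====
-- body of A's inner `for i in range(10)` loop (state_copy, length accumulator)
def aInner (state_dict : PySem.Dict Int Int) (index : Int) (char : Char) (state : Int)
    (acc : Int × Int) (i : Int) : Int × Int :=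
  if PySem.Int.toStr i ≠ String.singleton char then
    let state_copy := PySem.Int.bxor acc.1 (pvShl 1 i)
    let length := if state_dict.contains state_copy = true then
        max acc.2 (index - state_dict.getD state_copy 0) else acc.2
    (state, length)   -- `state_copy = state` reset
  else acc

-- body of A's `for index, char in enumerate(s)` loop over (state, state_dict, length)
def aStep (acc : Int × PySem.Dict Int Int × Int) (ic : Int × Char) : Int × PySem.Dict Int Int × Int :=
  let index := ic.1
  let char := ic.2
  let digit_index := PySem.Str.find "0123456789" (String.singleton char)
  let state := PySem.Int.bxor acc.1 (pvShl 1 digit_index)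
  if acc.2.1.contains state = false then
    let state_dict := acc.2.1.insert state index
    let r := (PySem.List.pyRange 0 10 1).foldl (aInner state_dict index char state) (state, acc.2.2)
    (state, state_dict, r.2)
  else
    let length := max acc.2.2 (index - acc.2.1.getD state 0 + 1)  -- getD: key is present (contains = true)
    let r := (PySem.List.pyRange 0 10 1).foldl (aInner acc.2.1 index char state) (state, length)
    (state, acc.2.1, r.2)

def longestAwesome (s : String) : Int :=
  let r := (PySem.List.enumerate s.toList 0).foldl aStep (0, PySem.Dict.ofList [(0, -1)], 1)
  min r.2.2 (PySem.Str.len s)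

-- ===== PORT B =====
-- body of B's inner `for j in range(i, n)` loop over (mask, best); s[j] never raises
-- (i ≤ j < n), so pyGetD's default is unreachable; int(s[j]) raises ValueError exactly
-- on non-digit characters (excluded by Pre_), .getD 0 is junk there.
def bInner (l : List Char) (i : Int) (acc : Int × Int) (j : Int) : Int × Int :=
  let mask := PySem.Int.bxor acc.1
    (pvShl 1 ((PySem.Int.ofStr? (String.singleton (PySem.List.pyGetD l j ' '))).getD 0))
  if PySem.Int.band mask (mask - 1) = 0 then (mask, max acc.2 (j - i + 1)) else (mask, acc.2)

def longestAwesome_alt (s : String) : Int :=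
  let n : Int := PySem.Str.len s
  (PySem.List.pyRange 0 n 1).foldl
    (fun best i => ((PySem.List.pyRange i n 1).foldl (bInner s.toList i) (0, best)).2) 0

-- ===== PRECONDITION & SPEC =====
-- Pre_ excludes exactly the inputs containing a non-digit character: there A (and B)
-- raise ValueError (`1 << -1` resp. `int(c)`); on all-digit strings A always returns.
def Pre_longestAwesome (s : String) : Prop :=
  (s.toList.all (fun c => decide (c ∈ ['0','1','2','3','4','5','6','7','8','9']))) = true
instance (s : String) : Decidable (Pre_longestAwesome s) := by unfold Pre_longestAwesome; infer_instance

def pvWitness_longestAwesome : String := "1542"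

def Spec_longestAwesome (s : String) (out : Int) : Prop := out = longestAwesome_alt s
instance (s : String) (out : Int) : Decidable (Spec_longestAwesome s out) := by unfold Spec_longestAwesome; infer_instance

-- ===== CLAIM (what is proved, stated in full; the proofs are below) =====
def Claim_equal_longestAwesome : Prop := ∀ (s : String), Dom_longestAwesome s → Pre_longestAwesome s → Spec_longestAwesome s (longestAwesome s)

-- ===== LEMMAS AND PROOFS =====

-- digit value / parity-mask abstractions
def pvDig (c : Char) : Prop := c ∈ ['0','1','2','3','4','5','6','7','8','9']
def pvDv (c : Char) : Nat := c.toNat - 48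
def pvPw (c : Char) : Nat := 2 ^ pvDv c
def pvPm (l : List Char) : Nat := l.foldl (fun a c => a ^^^ pvPw c) 0
def pvGd (m : Nat) : Bool := m &&& (m - 1) == 0
def pvAwe (l : List Char) (i j : Nat) : Prop :=
  i ≤ j ∧ j < l.length ∧ pvGd (pvPm (l.take i) ^^^ pvPm (l.take (j + 1))) = true
-- first t ≤ k with prefix parity m
def pvFidx (l : List Char) : Nat → Nat → Option Nat
  | 0, m => if pvPm (l.take 0) = m then some 0 else none
  | k + 1, m =>
    match pvFidx l k m with
    | some t => some t
    | none => if pvPm (l.take (k + 1)) = m then some (k + 1) else none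

lemma pvDig_cases (c : Char) (h : pvDig c) :
    c = '0' ∨ c = '1' ∨ c = '2' ∨ c = '3' ∨ c = '4' ∨ c = '5' ∨ c = '6' ∨ c = '7' ∨ c = '8' ∨ c = '9' := by
  simpa [pvDig] using h

lemma pvDv_lt (c : Char) (h : pvDig c) : pvDv c < 10 := by
  rcases pvDig_cases c h with rfl|rfl|rfl|rfl|rfl|rfl|rfl|rfl|rfl|rfl <;> decide
lemma find_digit (c : Char) (h : pvDig c) :
    PySem.Str.find "0123456789" (String.singleton c) = ((pvDv c : Nat) : Int) := by
  rcases pvDig_cases c h with rfl|rfl|rfl|rfl|rfl|rfl|rfl|rfl|rfl|rfl <;> decide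
lemma ofStr_digit (c : Char) (h : pvDig c) :
    PySem.Int.ofStr? (String.singleton c) = some ((pvDv c : Nat) : Int) := by
  rcases pvDig_cases c h with rfl|rfl|rfl|rfl|rfl|rfl|rfl|rfl|rfl|rfl <;> decide
lemma toStr_eq_iff (c : Char) (b : Nat) (h : pvDig c) (hb : b < 10) :
    (PySem.Int.toStr ((b : Nat) : Int) = String.singleton c) ↔ b = pvDv c := by
  interval_cases b <;> rcases pvDig_cases c h with rfl|rfl|rfl|rfl|rfl|rfl|rfl|rfl|rfl|rfl <;> decide
lemma pvShl_cast (b : Nat) : pvShl 1 ((b : Nat) : Int) = ((2 ^ b : Nat) : Int) := by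
  simp [pvShl]
lemma pvGd_pow (b : Nat) (hb : b < 10) : pvGd (2 ^ b) = true := by
  interval_cases b <;> decide
set_option maxRecDepth 10000 in
lemma pvGd_iff (m : Nat) (hm : m < 1024) :
    pvGd m = true ↔ m = 0 ∨ ∃ b < 10, m = 2 ^ b := by
  revert hm; revert m; decide
lemma band_test (m : Nat) :
    (PySem.Int.band (m : Int) ((m : Int) - 1) = 0) ↔ pvGd m = true := by
  cases m with
  | zero => decide
  | succ k =>
    have : ((k+1 : Nat) : Int) - 1 = ((k : Nat) : Int) := by push_cast; ring
    rw [this, PySem.Int.band_natCast]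
    simp [pvGd]
lemma pvPm_aux (l : List Char) (h : ∀ c ∈ l, pvDig c) :
    ∀ a : Nat, a < 1024 → l.foldl (fun a c => a ^^^ pvPw c) a < 1024 := by
  induction l with
  | nil => intro a ha; simpa using ha
  | cons c l ih =>
    intro a ha
    simp only [List.foldl_cons]
    exact ih (fun x hx => h x (List.mem_cons_of_mem _ hx)) _
      (Nat.xor_lt_two_pow (n := 10) ha (by
        have := pvDv_lt c (h c (List.mem_cons_self))
        simpa [pvPw] using Nat.pow_lt_pow_right (by norm_num) this))

lemma pvPm_lt (l : List Char) (h : ∀ c ∈ l, pvDig c) : pvPm l < 1024 :=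
  pvPm_aux l h 0 (by norm_num)
lemma pvPm_take_succ (l : List Char) (k : Nat) (h : k < l.length) :
    pvPm (l.take (k + 1)) = pvPm (l.take k) ^^^ pvPw l[k] := by
  have ht : l.take (k+1) = l.take k ++ [l[k]] := by
    rw [List.take_add_one]; simp [List.getElem?_eq_getElem h]
  simp only [pvPm]
  rw [ht, List.foldl_append]
  rfl
lemma pvFidx_spec (l : List Char) (k : Nat) : ∀ m t : Nat, pvFidx l k m = some t →
    t ≤ k ∧ pvPm (l.take t) = m := by
  induction k with
  | zero =>
    intro m t h
    simp only [pvFidx] at h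
    split at h
    · cases h; exact ⟨le_refl _, by assumption⟩
    · cases h
  | succ k ih =>
    intro m t h
    cases h' : pvFidx l k m with
    | some t0 =>
      simp only [pvFidx, h'] at h
      injection h with hh
      subst hh
      have := ih m t0 h'
      exact ⟨by omega, this.2⟩
    | none =>
      simp only [pvFidx, h'] at h
      split at h
      · cases h; exact ⟨le_refl _, by assumption⟩
      · cases h

lemma pvFidx_isSome (l : List Char) (k : Nat) : ∀ m i : Nat, i ≤ k → pvPm (l.take i) = m →
    (pvFidx l k m).isSome := by
  induction k with
  | zero =>
    intro m i hi hm
    interval_cases i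
    have hm' : pvPm ([] : List Char) = m := by simpa using hm
    simp [pvFidx, hm']
  | succ k ih =>
    intro m i hi hm
    rcases Nat.lt_or_ge i (k+1) with h | h
    · have := ih m i (by omega) hm
      rcases Option.isSome_iff_exists.mp this with ⟨t, ht⟩
      simp [pvFidx, ht]
    · have : i = k + 1 := by omega
      subst this
      cases h' : pvFidx l k m <;> simp [pvFidx, h', hm]

lemma pvFidx_le (l : List Char) (k : Nat) : ∀ m t i : Nat, pvFidx l k m = some t →
    i ≤ k → pvPm (l.take i) = m → t ≤ i := by
  induction k with
  | zero =>
    intro m t i h _ _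
    exact (pvFidx_spec l 0 m t h).1.trans (Nat.zero_le i)
  | succ k ih =>
    intro m t i h hi hm
    cases h' : pvFidx l k m with
    | some t0 =>
      simp only [pvFidx, h'] at h
      injection h with hh
      subst hh
      rcases Nat.lt_or_ge i (k+1) with hik | hik
      · exact ih m t0 i h' (by omega) hm
      · exact (pvFidx_spec l k m t0 h').1.trans (by omega)
    | none =>
      rcases Nat.lt_or_ge i (k+1) with hik | hik
      · exfalso
        have := pvFidx_isSome l k m i (by omega) hm
        rw [h'] at this
        simp at this
      · simp only [pvFidx, h'] at h
        split at h
        · cases h; omega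
        · cases h

-- B's inner loop characterisation
lemma bInner_loop (l : List Char) (hd : ∀ c ∈ l, pvDig c) (iN : Nat) :
    ∀ jN best, iN ≤ jN → jN ≤ l.length →
    best ≤ (((PySem.List.pyRange (jN : Int) (l.length : Int) 1).foldl (bInner l (iN : Int))
        (((pvPm (l.take iN) ^^^ pvPm (l.take jN) : Nat) : Int), best)).2) ∧
    (∀ j', jN ≤ j' → j' < l.length →
      pvGd (pvPm (l.take iN) ^^^ pvPm (l.take (j' + 1))) = true →
      (j' : Int) - iN + 1 ≤ (((PySem.List.pyRange (jN : Int) (l.length : Int) 1).foldl (bInner l (iN : Int))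
        (((pvPm (l.take iN) ^^^ pvPm (l.take jN) : Nat) : Int), best)).2)) ∧
    ((((PySem.List.pyRange (jN : Int) (l.length : Int) 1).foldl (bInner l (iN : Int))
        (((pvPm (l.take iN) ^^^ pvPm (l.take jN) : Nat) : Int), best)).2) = best ∨
      ∃ j', jN ≤ j' ∧ j' < l.length ∧ pvGd (pvPm (l.take iN) ^^^ pvPm (l.take (j' + 1))) = true ∧
        (((PySem.List.pyRange (jN : Int) (l.length : Int) 1).foldl (bInner l (iN : Int))
        (((pvPm (l.take iN) ^^^ pvPm (l.take jN) : Nat) : Int), best)).2) = (j' : Int) - iN + 1) := by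
  suffices H : ∀ f jN best, l.length - jN = f → iN ≤ jN → jN ≤ l.length →
      best ≤ (((PySem.List.pyRange (jN : Int) (l.length : Int) 1).foldl (bInner l (iN : Int))
          (((pvPm (l.take iN) ^^^ pvPm (l.take jN) : Nat) : Int), best)).2) ∧
      (∀ j', jN ≤ j' → j' < l.length →
        pvGd (pvPm (l.take iN) ^^^ pvPm (l.take (j' + 1))) = true →
        (j' : Int) - iN + 1 ≤ (((PySem.List.pyRange (jN : Int) (l.length : Int) 1).foldl (bInner l (iN : Int))
          (((pvPm (l.take iN) ^^^ pvPm (l.take jN) : Nat) : Int), best)).2)) ∧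
      ((((PySem.List.pyRange (jN : Int) (l.length : Int) 1).foldl (bInner l (iN : Int))
          (((pvPm (l.take iN) ^^^ pvPm (l.take jN) : Nat) : Int), best)).2) = best ∨
        ∃ j', jN ≤ j' ∧ j' < l.length ∧ pvGd (pvPm (l.take iN) ^^^ pvPm (l.take (j' + 1))) = true ∧
          (((PySem.List.pyRange (jN : Int) (l.length : Int) 1).foldl (bInner l (iN : Int))
          (((pvPm (l.take iN) ^^^ pvPm (l.take jN) : Nat) : Int), best)).2) = (j' : Int) - iN + 1) by
    intro jN best h1 h2
    exact H (l.length - jN) jN best rfl h1 h2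
  intro f
  induction f with
  | zero =>
    intro jN best hf hij hjn
    have hje : jN = l.length := by omega
    subst hje
    rw [PySem.List.pyRange_one_eq_nil (le_refl _)]
    refine ⟨le_refl _, ?_, Or.inl rfl⟩
    intro j' h1 h2 _
    omega
  | succ f ih =>
    intro jN best hf hij hjn
    have hlt : jN < l.length := by omega
    have hdig : pvDig l[jN] := hd _ (List.getElem_mem hlt)
    have hmask : (pvPm (l.take iN) ^^^ pvPm (l.take jN)) ^^^ 2 ^ pvDv l[jN]
        = pvPm (l.take iN) ^^^ pvPm (l.take (jN + 1)) := by
      rw [pvPm_take_succ l jN hlt]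
      simp [pvPw, Nat.xor_assoc]
    have hget : PySem.List.pyGetD l ((jN : Nat) : Int) ' ' = l[jN] := by
      rw [PySem.List.pyGetD_natCast]
      exact List.getD_eq_getElem l ' ' hlt
    have hstep : ∀ acc2 : Int, bInner l (iN : Int)
        ((((pvPm (l.take iN) ^^^ pvPm (l.take jN) : Nat) : Int), acc2)) ((jN : Nat) : Int)
        = (((pvPm (l.take iN) ^^^ pvPm (l.take (jN + 1)) : Nat) : Int),
           if pvGd (pvPm (l.take iN) ^^^ pvPm (l.take (jN + 1))) = true
           then max acc2 ((jN : Int) - iN + 1) else acc2) := by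
      intro acc2
      simp only [bInner, hget, ofStr_digit _ hdig, Option.getD_some, pvShl_cast,
        PySem.Int.bxor_natCast, hmask]
      by_cases hgd : pvGd (pvPm (l.take iN) ^^^ pvPm (l.take (jN + 1))) = true
      · rw [if_pos ((band_test _).mpr hgd), if_pos hgd]
      · rw [if_neg (fun hcon => hgd ((band_test _).mp hcon)), if_neg hgd]
    have hcons : PySem.List.pyRange ((jN : Nat) : Int) (l.length : Int) 1
        = ((jN : Nat) : Int) :: PySem.List.pyRange (((jN + 1 : Nat) : Nat) : Int) (l.length : Int) 1 := by
      rw [PySem.List.pyRange_one_cons (by exact_mod_cast hlt)]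
      norm_num
    rw [hcons]
    simp only [List.foldl_cons, hstep]
    by_cases hgd : pvGd (pvPm (l.take iN) ^^^ pvPm (l.take (jN + 1))) = true
    · rw [if_pos hgd]
      obtain ⟨A1, A2, A3⟩ := ih (jN + 1) (max best ((jN : Int) - iN + 1))
        (by omega) (by omega) (by omega)
      refine ⟨(le_max_left _ _).trans A1, ?_, ?_⟩
      · intro j' h1 h2 hgd'
        rcases Nat.eq_or_lt_of_le h1 with rfl | h1'
        · exact (le_max_right _ _).trans A1
        · exact A2 j' (by omega) h2 hgd'
      · rcases A3 with heq | ⟨j', h1, h2, h3, h4⟩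
        · rcases max_choice best ((jN : Int) - iN + 1) with hm | hm
          · exact Or.inl (by rw [heq, hm])
          · exact Or.inr ⟨jN, le_refl _, hlt, hgd, by rw [heq, hm]⟩
        · exact Or.inr ⟨j', by omega, h2, h3, h4⟩
    · rw [if_neg hgd]
      obtain ⟨A1, A2, A3⟩ := ih (jN + 1) best (by omega) (by omega) (by omega)
      refine ⟨A1, ?_, ?_⟩
      · intro j' h1 h2 hgd'
        rcases Nat.eq_or_lt_of_le h1 with rfl | h1'
        · exact absurd hgd' hgd
        · exact A2 j' (by omega) h2 hgd'
      · rcases A3 with heq | ⟨j', h1, h2, h3, h4⟩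
        · exact Or.inl heq
        · exact Or.inr ⟨j', by omega, h2, h3, h4⟩

-- B's outer loop characterisation
lemma bOuter_loop (l : List Char) (hd : ∀ c ∈ l, pvDig c) :
    ∀ i0 best, i0 ≤ l.length →
    best ≤ ((PySem.List.pyRange (i0 : Int) (l.length : Int) 1).foldl
        (fun best i => ((PySem.List.pyRange i (l.length : Int) 1).foldl (bInner l i) (0, best)).2) best) ∧
    (∀ i j, i0 ≤ i → pvAwe l i j →
      (j : Int) - i + 1 ≤ ((PySem.List.pyRange (i0 : Int) (l.length : Int) 1).foldl
        (fun best i => ((PySem.List.pyRange i (l.length : Int) 1).foldl (bInner l i) (0, best)).2) best)) ∧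
    (((PySem.List.pyRange (i0 : Int) (l.length : Int) 1).foldl
        (fun best i => ((PySem.List.pyRange i (l.length : Int) 1).foldl (bInner l i) (0, best)).2) best) = best ∨
      ∃ i j, pvAwe l i j ∧ ((PySem.List.pyRange (i0 : Int) (l.length : Int) 1).foldl
        (fun best i => ((PySem.List.pyRange i (l.length : Int) 1).foldl (bInner l i) (0, best)).2) best) = (j : Int) - i + 1) := by
  suffices H : ∀ f i0 best, l.length - i0 = f → i0 ≤ l.length →
      best ≤ ((PySem.List.pyRange (i0 : Int) (l.length : Int) 1).foldl
          (fun best i => ((PySem.List.pyRange i (l.length : Int) 1).foldl (bInner l i) (0, best)).2) best) ∧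
      (∀ i j, i0 ≤ i → pvAwe l i j →
        (j : Int) - i + 1 ≤ ((PySem.List.pyRange (i0 : Int) (l.length : Int) 1).foldl
          (fun best i => ((PySem.List.pyRange i (l.length : Int) 1).foldl (bInner l i) (0, best)).2) best)) ∧
      (((PySem.List.pyRange (i0 : Int) (l.length : Int) 1).foldl
          (fun best i => ((PySem.List.pyRange i (l.length : Int) 1).foldl (bInner l i) (0, best)).2) best) = best ∨
        ∃ i j, pvAwe l i j ∧ ((PySem.List.pyRange (i0 : Int) (l.length : Int) 1).foldl
          (fun best i => ((PySem.List.pyRange i (l.length : Int) 1).foldl (bInner l i) (0, best)).2) best) = (j : Int) - i + 1) by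
    intro i0 best h1
    exact H (l.length - i0) i0 best rfl h1
  intro f
  induction f with
  | zero =>
    intro i0 best hf hin
    have hie : i0 = l.length := by omega
    subst hie
    rw [PySem.List.pyRange_one_eq_nil (le_refl _)]
    refine ⟨le_refl _, ?_, Or.inl rfl⟩
    intro i j h1 ⟨h2, h3, _⟩
    omega
  | succ f ih =>
    intro i0 best hf hin
    have hlt : i0 < l.length := by omega
    have hcons : PySem.List.pyRange ((i0 : Nat) : Int) (l.length : Int) 1
        = ((i0 : Nat) : Int) :: PySem.List.pyRange (((i0 + 1 : Nat) : Nat) : Int) (l.length : Int) 1 := by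
      rw [PySem.List.pyRange_one_cons (by exact_mod_cast hlt)]
      norm_num
    rw [hcons]
    simp only [List.foldl_cons]
    have h0 : ((0 : Int)) = (((pvPm (l.take i0) ^^^ pvPm (l.take i0) : Nat) : Nat) : Int) := by
      simp
    obtain ⟨B1, B2, B3⟩ := bInner_loop l hd i0 i0 best (le_refl _) (le_of_lt hlt)
    rw [← h0] at B1 B2 B3
    obtain ⟨A1, A2, A3⟩ := ih (i0 + 1)
      (((PySem.List.pyRange ((i0 : Nat) : Int) (l.length : Int) 1).foldl (bInner l ((i0 : Nat) : Int))
        ((0 : Int), best)).2)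
      (show l.length - (i0 + 1) = f by clear h0 B1 B2 B3 hcons; omega) (show i0 + 1 ≤ l.length by clear h0 B1 B2 B3 hcons; omega)
    refine ⟨B1.trans A1, ?_, ?_⟩
    · intro i j h1 haw
      rcases Nat.eq_or_lt_of_le h1 with rfl | h1'
      · exact (B2 j haw.1 haw.2.1 haw.2.2).trans A1
      · exact A2 i j (by omega) haw
    · rcases A3 with heq | ⟨i, j, haw, hv⟩
      · rw [heq]
        rcases B3 with heq2 | ⟨j', hj1, hj2, hj3, hj4⟩
        · exact Or.inl heq2
        · exact Or.inr ⟨i0, j', ⟨hj1, hj2, hj3⟩, hj4⟩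
      · exact Or.inr ⟨i, j, haw, hv⟩

-- A's inner loop characterisation (generic over the iterated list)
lemma aInner_loop (sd : PySem.Dict Int Int) (idx : Int) (c : Char) (st : Int) :
    ∀ (xs : List Int) (len : Int),
    ((xs.foldl (aInner sd idx c st) (st, len)).1 = st) ∧
    (len ≤ (xs.foldl (aInner sd idx c st) (st, len)).2) ∧
    (∀ i ∈ xs, PySem.Int.toStr i ≠ String.singleton c →
      sd.contains (PySem.Int.bxor st (pvShl 1 i)) = true →
      idx - sd.getD (PySem.Int.bxor st (pvShl 1 i)) 0 ≤ (xs.foldl (aInner sd idx c st) (st, len)).2) ∧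
    ((xs.foldl (aInner sd idx c st) (st, len)).2 = len ∨
      ∃ i ∈ xs, PySem.Int.toStr i ≠ String.singleton c ∧
        sd.contains (PySem.Int.bxor st (pvShl 1 i)) = true ∧
        (xs.foldl (aInner sd idx c st) (st, len)).2 = idx - sd.getD (PySem.Int.bxor st (pvShl 1 i)) 0) := by
  intro xs
  induction xs with
  | nil =>
    intro len
    refine ⟨rfl, le_refl _, ?_, Or.inl rfl⟩
    intro i hi
    cases hi
  | cons x xs ih =>
    intro len
    have hstep : ∃ len1 : Int, aInner sd idx c st (st, len) x = (st, len1) ∧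
        ((len1 = len ∧ ¬ (PySem.Int.toStr x ≠ String.singleton c ∧
            sd.contains (PySem.Int.bxor st (pvShl 1 x)) = true)) ∨
          (PySem.Int.toStr x ≠ String.singleton c ∧
          sd.contains (PySem.Int.bxor st (pvShl 1 x)) = true ∧
          len1 = max len (idx - sd.getD (PySem.Int.bxor st (pvShl 1 x)) 0))) := by
      by_cases hc : PySem.Int.toStr x ≠ String.singleton c
      · by_cases hk : sd.contains (PySem.Int.bxor st (pvShl 1 x)) = true
        · exact ⟨_, by simp [aInner, hc, hk], Or.inr ⟨hc, hk, rfl⟩⟩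
        · exact ⟨len, by simp [aInner, hc, hk], Or.inl ⟨rfl, by tauto⟩⟩
      · exact ⟨len, by simp [aInner, hc], Or.inl ⟨rfl, by tauto⟩⟩
    obtain ⟨len1, hstep, hlen1⟩ := hstep
    have hmono : len ≤ len1 := by
      rcases hlen1 with ⟨rfl, _⟩ | ⟨_, _, rfl⟩
      · exact le_refl _
      · exact le_max_left _ _
    obtain ⟨ih1, ih2, ih3, ih4⟩ := ih len1
    simp only [List.foldl_cons, hstep]
    refine ⟨ih1, hmono.trans ih2, ?_, ?_⟩
    · intro i hi hcond hcont
      rcases List.mem_cons.mp hi with rfl | hi'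
      · rcases hlen1 with ⟨_, hno⟩ | ⟨_, _, rfl⟩
        · exact absurd ⟨hcond, hcont⟩ hno
        · exact (le_max_right _ _).trans ih2
      · exact ih3 i hi' hcond hcont
    · rcases ih4 with heq | ⟨i, hi, h1, h2, h3⟩
      · rcases hlen1 with ⟨rfl, _⟩ | ⟨hc1, hc2, hmax⟩
        · exact Or.inl heq
        · rcases max_choice len (idx - sd.getD (PySem.Int.bxor st (pvShl 1 x)) 0) with hm | hm
          · exact Or.inl (by rw [heq, hmax, hm])
          · exact Or.inr ⟨x, List.mem_cons_self, hc1, hc2, by rw [heq, hmax, hm]⟩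
      · exact Or.inr ⟨i, List.mem_cons_of_mem _ hi, h1, h2, h3⟩

-- invariant of A's main loop
def pvInv (l : List Char) (M : Int) (k : Nat) (acc : Int × PySem.Dict Int Int × Int) : Prop :=
  acc.1 = ((pvPm (l.take k) : Nat) : Int) ∧
  (∀ m : Nat, acc.2.1.get? (m : Int) = (pvFidx l k m).map (fun t => (t : Int) - 1)) ∧
  1 ≤ acc.2.2 ∧
  (∀ i j : Nat, i ≤ j → j < k → pvPm (l.take i) = pvPm (l.take (j + 1)) →
    (j : Int) - i + 2 ≤ acc.2.2) ∧
  (∀ i j : Nat, ∀ b < 10, i ≤ j → j < k → (hj : j < l.length) → b ≠ pvDv l[j] →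
    pvPm (l.take i) ^^^ pvPm (l.take (j + 1)) = 2 ^ b → (j : Int) - i + 1 ≤ acc.2.2) ∧
  min acc.2.2 (l.length : Int) ≤ M

lemma pvGd_zero : pvGd 0 = true := by decide

lemma pvXorPowNe (m b : Nat) : m ^^^ 2 ^ b ≠ m := by
  intro h
  have h2 := Nat.xor_xor_cancel_left m (2 ^ b)
  rw [h, Nat.xor_self] at h2
  have hp : 0 < 2 ^ b := Nat.two_pow_pos b
  omega

lemma aMain_loop (l : List Char) (hd : ∀ c ∈ l, pvDig c) (M : Int)
    (HM : ∀ i j, pvAwe l i j → (j : Int) - i + 1 ≤ M) :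
    ∀ (rest pre : List Char) (acc : Int × PySem.Dict Int Int × Int),
      l = pre ++ rest → pvInv l M pre.length acc →
      pvInv l M l.length ((PySem.List.enumerate rest (pre.length : Int)).foldl aStep acc) := by
  intro rest
  induction rest with
  | nil =>
    intro pre acc hl hinv
    have : pre.length = l.length := by rw [hl]; simp
    rw [← this]
    simpa [PySem.List.enumerate] using hinv
  | cons c rest ih =>
    intro pre acc hl hinv
    obtain ⟨st, d, len⟩ := acc
    obtain ⟨Hst, Hd, Hlen1, HL0, HL1, Hup⟩ := hinv
    simp only at Hst Hd Hlen1 HL0 HL1 Hup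
    set k := pre.length with hk
    have hkn : k < l.length := by rw [hl]; simp [hk]
    have hck : l[k] = c := by
      have h1 : l[k]? = some c := by
        rw [hl, List.getElem?_append_right (by simp [hk])]
        simp [hk]
      rw [List.getElem?_eq_getElem hkn] at h1
      exact Option.some.inj h1
    have hdig : pvDig c := by rw [← hck]; exact hd _ (List.getElem_mem hkn)
    have hdvlt : pvDv c < 10 := pvDv_lt c hdig
    -- the new state value
    have hPk1 : pvPm (l.take (k + 1)) = pvPm (l.take k) ^^^ 2 ^ pvDv c := by
      rw [pvPm_take_succ l k hkn, hck]; rfl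
    have hst' : PySem.Int.bxor st (pvShl 1 (PySem.Str.find "0123456789" (String.singleton c)))
        = ((pvPm (l.take (k + 1)) : Nat) : Int) := by
      rw [Hst, find_digit c hdig, pvShl_cast, PySem.Int.bxor_natCast, hPk1]
    -- dict facts
    have hcont : ∀ m : Nat, d.contains ((m : Nat) : Int) = (pvFidx l k m).isSome := by
      intro m
      rw [PySem.Dict.contains_eq_isSome_get?, Hd m]
      cases pvFidx l k m <;> simp
    have hgetD : ∀ m t : Nat, pvFidx l k m = some t → d.getD ((m : Nat) : Int) 0 = (t : Int) - 1 := by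
      intro m t h
      rw [PySem.Dict.getD_eq_get?_getD, Hd m, h]
      rfl
    -- candidates of the inner loop are awesome substrings, and the dict invariant is stable
    have hKey : ∀ b : Nat, PySem.Int.bxor ((pvPm (l.take (k + 1)) : Nat) : Int) (pvShl 1 ((b : Nat) : Int))
        = ((pvPm (l.take (k + 1)) ^^^ 2 ^ b : Nat) : Int) := by
      intro b
      rw [pvShl_cast, PySem.Int.bxor_natCast]
    -- enumerate cons
    rw [PySem.List.enumerate_cons, List.foldl_cons]
    have hlen' : ((pre ++ [c]).length : Int) = (k : Int) + 1 := by simp [hk]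
    have hl' : l = (pre ++ [c]) ++ rest := by rw [hl]; simp
    -- the inner candidate upper bound (shared by both membership branches)
    have hInnerUB : ∀ b t' : Nat, b < 10 → pvFidx l k (pvPm (l.take (k + 1)) ^^^ 2 ^ b) = some t' →
        (k : Int) - ((t' : Int) - 1) ≤ M := by
      intro b t' hb hfx
      obtain ⟨ht'k, ht'm⟩ := pvFidx_spec l k _ _ hfx
      have hgd : pvGd (pvPm (l.take t') ^^^ pvPm (l.take (k + 1))) = true := by
        rw [ht'm, Nat.xor_comm, Nat.xor_xor_cancel_left]
        exact pvGd_pow b hb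
      have := HM t' k ⟨ht'k, hkn, hgd⟩
      omega
    -- lower-bound helper: any i ≤ k with parity (take (k+1)) ^^^ 2^b seen gives candidate ≥ k - i + 1
    have hInnerLB : ∀ (sd : PySem.Dict Int Int),
        (∀ m : Nat, m ≠ pvPm (l.take (k + 1)) → sd.get? ((m : Nat) : Int) = d.get? ((m : Nat) : Int)) →
        ∀ b i : Nat, b < 10 → i ≤ k → pvPm (l.take i) = pvPm (l.take (k + 1)) ^^^ 2 ^ b →
        sd.contains (PySem.Int.bxor ((pvPm (l.take (k + 1)) : Nat) : Int) (pvShl 1 ((b : Nat) : Int))) = true ∧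
        (k : Int) - (i : Int) + 1 ≤
          (k : Int) - sd.getD (PySem.Int.bxor ((pvPm (l.take (k + 1)) : Nat) : Int) (pvShl 1 ((b : Nat) : Int))) 0 := by
      intro sd hsd b i hb hik hpar
      have hne : pvPm (l.take (k + 1)) ^^^ 2 ^ b ≠ pvPm (l.take (k + 1)) := pvXorPowNe _ b
      have hsome := pvFidx_isSome l k _ i hik hpar
      obtain ⟨t', hfx⟩ := Option.isSome_iff_exists.mp hsome
      have hle := pvFidx_le l k _ t' i hfx hik hpar
      rw [hKey b]
      constructor
      · rw [PySem.Dict.contains_eq_isSome_get?, hsd _ hne, Hd _, hfx]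
        rfl
      · have hgd2 : sd.getD ((pvPm (l.take (k + 1)) ^^^ 2 ^ b : Nat) : Int) 0 = (t' : Int) - 1 := by
          rw [PySem.Dict.getD_eq_get?_getD, hsd _ hne, Hd _, hfx]
          rfl
        rw [hgd2]
        omega
    -- now split on membership of the new state
    cases hfx : pvFidx l k (pvPm (l.take (k + 1))) with
    | some t0 =>
      obtain ⟨ht0k, ht0m⟩ := pvFidx_spec l k _ _ hfx
      have hcontTrue : d.contains (((pvPm (l.take (k + 1)) : Nat) : Int)) = true := by
        rw [hcont, hfx]; rfl
      have hgetD0 : d.getD (((pvPm (l.take (k + 1)) : Nat) : Int)) 0 = (t0 : Int) - 1 :=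
        hgetD _ t0 hfx
      have hstep : aStep (st, d, len) ((k : Int), c) =
          (((pvPm (l.take (k + 1)) : Nat) : Int), d,
            ((PySem.List.pyRange 0 10 1).foldl
              (aInner d (k : Int) c (((pvPm (l.take (k + 1)) : Nat) : Int)))
              (((pvPm (l.take (k + 1)) : Nat) : Int),
                max len ((k : Int) - ((t0 : Int) - 1) + 1))).2) := by
        simp only [aStep, hst', hcontTrue, hgetD0]
        rfl
      rw [hstep]
      obtain ⟨I1, I2, I3, I4⟩ := aInner_loop d (k : Int) c (((pvPm (l.take (k + 1)) : Nat) : Int))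
        (PySem.List.pyRange 0 10 1) (max len ((k : Int) - ((t0 : Int) - 1) + 1))
      set len1 := max len ((k : Int) - ((t0 : Int) - 1) + 1) with hlen1d
      set R := ((PySem.List.pyRange 0 10 1).foldl
          (aInner d (k : Int) c (((pvPm (l.take (k + 1)) : Nat) : Int)))
          (((pvPm (l.take (k + 1)) : Nat) : Int), len1)).2 with hRd
      have hlenR : len ≤ R := (le_max_left _ _).trans I2
      have hcandR : (k : Int) - ((t0 : Int) - 1) + 1 ≤ R := (le_max_right _ _).trans I2
      -- establish invariant at k+1 for the accumulator (st', d, R), then apply ih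
      have hinv' : pvInv l M (pre ++ [c]).length (((pvPm (l.take (k + 1)) : Nat) : Int), d, R) := by
        refine ⟨by simp [hk], ?_, Hlen1.trans hlenR, ?_, ?_, ?_⟩
        · -- dict unchanged; pvFidx (k+1) agrees with pvFidx k
          intro m
          simp only [List.length_append, List.length_cons, List.length_nil]
          show d.get? ((m : Nat) : Int) = (pvFidx l (k + 1) m).map (fun t => (t : Int) - 1)
          rw [Hd m]
          cases hfm : pvFidx l k m with
          | some t => simp [pvFidx, hfm]
          | none =>
            have hmne : ¬ (pvPm (l.take (k + 1)) = m) := by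
              intro hcon
              rw [← hcon] at hfm
              rw [hfm] at hfx
              cases hfx
            simp [pvFidx, hfm, hmne]
        · -- HL0 at k+1
          intro i j hij hjk hpar
          simp only [List.length_append, List.length_cons, List.length_nil] at hjk
          rcases Nat.lt_or_ge j k with hjk' | hjk'
          · exact (HL0 i j hij hjk' hpar).trans hlenR
          · have hjeq : j = k := by omega
            rw [hjeq] at hpar ⊢
            have ht0i := pvFidx_le l k _ t0 i hfx (by omega) hpar
            calc (k : Int) - i + 2 ≤ (k : Int) - ((t0 : Int) - 1) + 1 := by omega
              _ ≤ R := hcandR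
        · -- HL1 at k+1
          intro i j b hb hij hjk hj hbne hpar
          simp only [List.length_append, List.length_cons, List.length_nil] at hjk
          rcases Nat.lt_or_ge j k with hjk' | hjk'
          · exact (HL1 i j b hb hij hjk' hj hbne hpar).trans hlenR
          · have hjeq : j = k := by omega
            simp only [hjeq] at hpar hbne ⊢
            rw [hck] at hbne
            have hpar' : pvPm (l.take i) = pvPm (l.take (k + 1)) ^^^ 2 ^ b := by
              have h2 : (pvPm (l.take i) ^^^ pvPm (l.take (k + 1))) ^^^ pvPm (l.take (k + 1))
                  = 2 ^ b ^^^ pvPm (l.take (k + 1)) := by rw [hpar]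
              rw [Nat.xor_xor_cancel_right] at h2
              rw [h2, Nat.xor_comm]
            obtain ⟨hcontB, hcandB⟩ := hInnerLB d (fun m _ => rfl) b i hb (by omega) hpar'
            have hcondB : PySem.Int.toStr ((b : Nat) : Int) ≠ String.singleton c := by
              intro hcon
              exact hbne ((toStr_eq_iff c b hdig hb).mp hcon)
            have hmem : ((b : Nat) : Int) ∈ PySem.List.pyRange 0 10 1 := by
              rw [PySem.List.mem_pyRange_one]
              constructor <;> [positivity; exact_mod_cast hb]
            have := I3 ((b : Nat) : Int) hmem hcondB hcontB
            omega
        · -- upper bound at k+1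
          rcases I4 with heq | ⟨xi, hximem, hxicond, hxicont, hxival⟩
          · rw [hRd] at heq
            rw [heq]
            rcases max_choice len ((k : Int) - ((t0 : Int) - 1) + 1) with hm | hm
            · rw [hlen1d, hm]; exact Hup
            · rw [hlen1d, hm]
              -- candidate k - t0 + 2 capped by n is ≤ M
              rcases Nat.eq_zero_or_pos t0 with ht00 | ht0pos
              · subst ht00
                have hP0 : pvPm (l.take (k + 1)) = 0 := by simpa [pvPm] using ht0m.symm
                rcases Nat.lt_or_ge (k + 1) l.length with hkk | hkk
                · -- extend one to the right
                  have hdig2 : pvDig l[k + 1] := hd _ (List.getElem_mem hkk)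
                  have hgd2 : pvGd (pvPm (l.take 0) ^^^ pvPm (l.take (k + 1 + 1))) = true := by
                    rw [pvPm_take_succ l (k + 1) hkk, hP0]
                    simp only [List.take_zero]
                    show pvGd (pvPm [] ^^^ (0 ^^^ pvPw l[k + 1])) = true
                    have : pvPm [] = 0 := rfl
                    rw [this, Nat.zero_xor, Nat.zero_xor, pvPw]
                    exact pvGd_pow _ (pvDv_lt _ hdig2)
                  have := HM 0 (k + 1) ⟨by omega, hkk, hgd2⟩
                  have hmin : min ((k : Int) - ((0 : Int) - 1) + 1) (l.length : Int) ≤ (k : Int) - ((0 : Int) - 1) + 1 := min_le_left _ _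
                  push_cast at this ⊢
                  omega
                · -- the whole string is even: M ≥ n
                  have hgd2 : pvGd (pvPm (l.take 0) ^^^ pvPm (l.take (k + 1))) = true := by
                    rw [hP0]
                    simp only [List.take_zero]
                    show pvGd (pvPm [] ^^^ 0) = true
                    have : pvPm [] = 0 := rfl
                    rw [this]
                    exact pvGd_zero
                  have := HM 0 k ⟨by omega, hkn, hgd2⟩
                  have hmin : min ((k : Int) - ((0 : Int) - 1) + 1) (l.length : Int) ≤ (l.length : Int) := min_le_right _ _
                  push_cast at this ⊢
                  omega
              · -- shift one to the left of t0
                have ht0lt : t0 - 1 < l.length := by omega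
                have hdig2 : pvDig l[t0 - 1] := hd _ (List.getElem_mem ht0lt)
                have hgd2 : pvGd (pvPm (l.take (t0 - 1)) ^^^ pvPm (l.take (k + 1))) = true := by
                  rw [← ht0m]
                  have hsucc := pvPm_take_succ l (t0 - 1) ht0lt
                  have ht01 : t0 - 1 + 1 = t0 := by omega
                  rw [ht01] at hsucc
                  rw [hsucc, Nat.xor_xor_cancel_left, pvPw]
                  exact pvGd_pow _ (pvDv_lt _ hdig2)
                have := HM (t0 - 1) k ⟨by omega, hkn, hgd2⟩
                have hc1 : ((t0 - 1 : Nat) : Int) = (t0 : Int) - 1 := by omega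
                rw [hc1] at this
                have hmin : min ((k : Int) - ((t0 : Int) - 1) + 1) (l.length : Int) ≤ (k : Int) - ((t0 : Int) - 1) + 1 := min_le_left _ _
                omega
          · -- R equals an inner candidate: it is ≤ M uncapped
            obtain ⟨hxi0, hxi10⟩ := PySem.List.mem_pyRange_one.mp hximem
            have hxib : xi = ((xi.toNat : Nat) : Int) := by omega
            set b := xi.toNat with hbd
            have hb10 : b < 10 := by omega
            rw [hxib, hKey b] at hxicont hxival
            have hsome : (pvFidx l k (pvPm (l.take (k + 1)) ^^^ 2 ^ b)).isSome := by
              rw [← hcont, ← hxicont]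
            obtain ⟨t', hfx'⟩ := Option.isSome_iff_exists.mp hsome
            have := hInnerUB b t' hb10 hfx'
            have hgv := hgetD _ t' hfx'
            rw [hRd] at hxival
            rw [hxival, hgv]
            exact le_trans (min_le_left _ _) this
      have := ih (pre ++ [c]) (((pvPm (l.take (k + 1)) : Nat) : Int), d, R) hl' hinv'
      rw [hlen'] at this
      exact this
    | none =>
      have hcontFalse : d.contains (((pvPm (l.take (k + 1)) : Nat) : Int)) = false := by
        rw [hcont, hfx]; rfl
      set d' := d.insert (((pvPm (l.take (k + 1)) : Nat) : Int)) ((k : Nat) : Int) with hd'd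
      have hsd : ∀ m : Nat, m ≠ pvPm (l.take (k + 1)) →
          d'.get? ((m : Nat) : Int) = d.get? ((m : Nat) : Int) := by
        intro m hm
        exact PySem.Dict.get?_insert_of_ne d _ (by exact_mod_cast hm)
      have Hd' : ∀ m : Nat, d'.get? ((m : Nat) : Int) = (pvFidx l (k + 1) m).map (fun t => (t : Int) - 1) := by
        intro m
        by_cases hm : m = pvPm (l.take (k + 1))
        · subst hm
          rw [hd'd, PySem.Dict.get?_insert_self]
          have : pvFidx l (k + 1) (pvPm (l.take (k + 1))) = some (k + 1) := by
            simp [pvFidx, hfx]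
          rw [this]
          simp
        · rw [hsd m hm, Hd m]
          cases hfm : pvFidx l k m with
          | some t => simp [pvFidx, hfm]
          | none =>
            have hmne : ¬ (pvPm (l.take (k + 1)) = m) := fun hcon => hm hcon.symm
            simp [pvFidx, hfm, hmne]
      have hcont' : ∀ m : Nat, d'.contains ((m : Nat) : Int) = (pvFidx l (k + 1) m).isSome := by
        intro m
        rw [PySem.Dict.contains_eq_isSome_get?, Hd' m]
        cases pvFidx l (k + 1) m <;> simp
      have hstep : aStep (st, d, len) ((k : Int), c) =
          (((pvPm (l.take (k + 1)) : Nat) : Int), d',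
            ((PySem.List.pyRange 0 10 1).foldl
              (aInner d' (k : Int) c (((pvPm (l.take (k + 1)) : Nat) : Int)))
              (((pvPm (l.take (k + 1)) : Nat) : Int), len)).2) := by
        simp only [aStep, hst', hcontFalse]
        rfl
      rw [hstep]
      obtain ⟨I1, I2, I3, I4⟩ := aInner_loop d' (k : Int) c (((pvPm (l.take (k + 1)) : Nat) : Int))
        (PySem.List.pyRange 0 10 1) len
      set R := ((PySem.List.pyRange 0 10 1).foldl
          (aInner d' (k : Int) c (((pvPm (l.take (k + 1)) : Nat) : Int)))
          (((pvPm (l.take (k + 1)) : Nat) : Int), len)).2 with hRd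
      have hinv' : pvInv l M (pre ++ [c]).length (((pvPm (l.take (k + 1)) : Nat) : Int), d', R) := by
        refine ⟨by simp [hk], ?_, Hlen1.trans I2, ?_, ?_, ?_⟩
        · intro m
          simp only [List.length_append, List.length_cons, List.length_nil]
          exact Hd' m
        · -- HL0 at k+1: the new state was never seen before
          intro i j hij hjk hpar
          simp only [List.length_append, List.length_cons, List.length_nil] at hjk
          rcases Nat.lt_or_ge j k with hjk' | hjk'
          · exact (HL0 i j hij hjk' hpar).trans I2
          · exfalso
            have hjeq : j = k := by omega
            rw [hjeq] at hpar
            have := pvFidx_isSome l k _ i (by omega) hpar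
            rw [hfx] at this
            simp at this
        · -- HL1 at k+1
          intro i j b hb hij hjk hj hbne hpar
          simp only [List.length_append, List.length_cons, List.length_nil] at hjk
          rcases Nat.lt_or_ge j k with hjk' | hjk'
          · exact (HL1 i j b hb hij hjk' hj hbne hpar).trans I2
          · have hjeq : j = k := by omega
            simp only [hjeq] at hpar hbne ⊢
            rw [hck] at hbne
            have hpar' : pvPm (l.take i) = pvPm (l.take (k + 1)) ^^^ 2 ^ b := by
              have h2 : (pvPm (l.take i) ^^^ pvPm (l.take (k + 1))) ^^^ pvPm (l.take (k + 1))
                  = 2 ^ b ^^^ pvPm (l.take (k + 1)) := by rw [hpar]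
              rw [Nat.xor_xor_cancel_right] at h2
              rw [h2, Nat.xor_comm]
            obtain ⟨hcontB, hcandB⟩ := hInnerLB d' hsd b i hb (by omega) hpar'
            have hcondB : PySem.Int.toStr ((b : Nat) : Int) ≠ String.singleton c := by
              intro hcon
              exact hbne ((toStr_eq_iff c b hdig hb).mp hcon)
            have hmem : ((b : Nat) : Int) ∈ PySem.List.pyRange 0 10 1 := by
              rw [PySem.List.mem_pyRange_one]
              constructor <;> [positivity; exact_mod_cast hb]
            have := I3 ((b : Nat) : Int) hmem hcondB hcontB
            omega
        · -- upper bound at k+1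
          rcases I4 with heq | ⟨xi, hximem, hxicond, hxicont, hxival⟩
          · rw [hRd] at heq
            rw [heq]
            exact Hup
          · obtain ⟨hxi0, hxi10⟩ := PySem.List.mem_pyRange_one.mp hximem
            have hxib : xi = ((xi.toNat : Nat) : Int) := by omega
            set b := xi.toNat with hbd
            have hb10 : b < 10 := by omega
            rw [hxib, hKey b] at hxicont hxival
            have hne : pvPm (l.take (k + 1)) ^^^ 2 ^ b ≠ pvPm (l.take (k + 1)) := pvXorPowNe _ b
            have hsome : (pvFidx l (k + 1) (pvPm (l.take (k + 1)) ^^^ 2 ^ b)).isSome := by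
              rw [← hcont', ← hxicont]
            have hsome' : (pvFidx l k (pvPm (l.take (k + 1)) ^^^ 2 ^ b)).isSome := by
              rcases Option.isSome_iff_exists.mp hsome with ⟨t', hfx'⟩
              cases hfk : pvFidx l k (pvPm (l.take (k + 1)) ^^^ 2 ^ b) with
              | some t => rfl
              | none =>
                exfalso
                have hcond : ¬ (pvPm (l.take (k + 1)) = pvPm (l.take (k + 1)) ^^^ 2 ^ b) :=
                  fun hcon => hne hcon.symm
                simp [pvFidx, hfk, hcond] at hfx'
            obtain ⟨t', hfx'⟩ := Option.isSome_iff_exists.mp hsome'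
            have hub := hInnerUB b t' hb10 hfx'
            have hgv : d'.getD ((pvPm (l.take (k + 1)) ^^^ 2 ^ b : Nat) : Int) 0 = (t' : Int) - 1 := by
              rw [PySem.Dict.getD_eq_get?_getD, hsd _ hne, Hd _, hfx']
              rfl
            rw [hRd] at hxival
            rw [hxival, hgv]
            exact le_trans (min_le_left _ _) hub
      have := ih (pre ++ [c]) (((pvPm (l.take (k + 1)) : Nat) : Int), d', R) hl' hinv'
      rw [hlen'] at this
      exact this

-- base of the main-loop invariant
lemma aBase (l : List Char) (hd : ∀ c ∈ l, pvDig c) (M : Int)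
    (HM : ∀ i j, pvAwe l i j → (j : Int) - i + 1 ≤ M) (HM0 : 0 ≤ M) :
    pvInv l M 0 (0, PySem.Dict.ofList [((0 : Int), (-1 : Int))], 1) := by
  refine ⟨by simp [pvPm], ?_, le_refl _, ?_, ?_, ?_⟩
  · intro m
    have hfidx0 : pvFidx l 0 m = if 0 = m then some 0 else none := by
      simp [pvFidx, pvPm]
    have h : PySem.Dict.ofList [((0 : Int), (-1 : Int))] = PySem.Dict.mk [(0, -1)] := by rfl
    show (PySem.Dict.ofList [((0 : Int), (-1 : Int))]).get? ((m : Nat) : Int) = _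
    rw [h, PySem.Dict.get?_mk_cons, hfidx0]
    rcases Nat.eq_zero_or_pos m with rfl | hm
    · simp
    · have hne : ((0 : Int) == (m : Int)) = false := by
        simp only [beq_eq_false_iff_ne]
        omega
      rw [hne, if_neg (by omega : ¬ (0 = m))]
      rfl
  · intro i j _ hj _
    omega
  · intro i j b _ _ hj _ _ _
    omega
  · show min (1 : Int) (l.length : Int) ≤ M
    rcases Nat.eq_zero_or_pos l.length with h0 | hpos
    · rw [h0]
      have := HM0
      norm_num
      omega
    · have hgd : pvGd (pvPm (l.take 0) ^^^ pvPm (l.take 1)) = true := by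
      -- one character is awesome
        rw [pvPm_take_succ l 0 hpos]
        have hz : pvPm (l.take 0) = 0 := by simp [pvPm]
        rw [hz, Nat.zero_xor, Nat.zero_xor, pvPw]
        exact pvGd_pow _ (pvDv_lt _ (hd _ (List.getElem_mem hpos)))
    -- M is at least 1
      have h1 := HM 0 0 ⟨le_refl _, hpos, hgd⟩
      have : min (1 : Int) (l.length : Int) ≤ 1 := min_le_left _ _
      push_cast at h1
      omega

-- ===== VERDICT (by name: the statement is the Claim_ definition above) =====
theorem longestAwesome_spec : Claim_equal_longestAwesome := by
  intro s _ hpre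
  show longestAwesome s = longestAwesome_alt s
  have hd : ∀ c ∈ s.toList, pvDig c := by
    rw [Pre_longestAwesome, List.all_eq_true] at hpre
    intro c hc
    have h := hpre c hc
    rw [decide_eq_true_eq] at h
    exact h
  set l := s.toList with hld
  set M := longestAwesome_alt s with hMd
  -- characterise B
  have hlen : PySem.Str.len s = (l.length : Int) := by simp [PySem.Str.len_eq, hld]
  have hBv : M = (PySem.List.pyRange ((0 : Nat) : Int) (l.length : Int) 1).foldl
      (fun best i => ((PySem.List.pyRange i (l.length : Int) 1).foldl (bInner l i) (0, best)).2) 0 := by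
    rw [hMd]
    simp only [longestAwesome_alt, hlen]
    rw [← hld]
    norm_num
  obtain ⟨B1, B2, B3⟩ := bOuter_loop l hd 0 0 (Nat.zero_le _)
  have HM : ∀ i j, pvAwe l i j → (j : Int) - i + 1 ≤ M := by
    intro i j haw
    rw [hBv]
    exact B2 i j (Nat.zero_le _) haw
  have HM0 : (0 : Int) ≤ M := by rw [hBv]; exact B1
  -- characterise A via the invariant
  have hbase := aBase l hd M HM HM0
  have hfin := aMain_loop l hd M HM l [] (0, PySem.Dict.ofList [((0 : Int), (-1 : Int))], 1)
    (by simp) hbase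
  simp only [List.length_nil, Nat.cast_zero] at hfin
  obtain ⟨_, _, hlen1, hl0, hl1, hup⟩ := hfin
  have hAv : longestAwesome s =
      min ((PySem.List.enumerate l 0).foldl aStep
        (0, PySem.Dict.ofList [((0 : Int), (-1 : Int))], 1)).2.2 (l.length : Int) := by
    simp only [longestAwesome, hlen]
    rw [← hld]
  rw [hAv]
  set r2 := ((PySem.List.enumerate l 0).foldl aStep
    (0, PySem.Dict.ofList [((0 : Int), (-1 : Int))], 1)).2.2 with hr2
  -- A ≤ B is the invariant's upper bound
  refine le_antisymm hup ?_
  -- B ≤ A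
  rcases B3 with hB0 | ⟨i, j, haw, hBij⟩
  · rw [hBv, hB0]
    exact le_min (by omega) (by positivity)
  · have hMij : M = (j : Int) - i + 1 := by rw [hBv, hBij]
    obtain ⟨hij, hjn, hgd⟩ := haw
    have hMn : M ≤ (l.length : Int) := by
      rw [hMij]
      omega
    -- show M ≤ r2 by classifying the parity mask of the optimal substring
    have hsub1 : ∀ a : Nat, pvPm (l.take a) < 2 ^ 10 :=
      fun a => pvPm_lt (l.take a) (fun c hc => hd c (List.take_subset a l hc))
    have hmlt : pvPm (l.take i) ^^^ pvPm (l.take (j + 1)) < 1024 :=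
      Nat.xor_lt_two_pow (hsub1 i) (hsub1 (j + 1))
    have hMr : M ≤ r2 := by
      rcases (pvGd_iff _ hmlt).mp hgd with hm0 | ⟨b, hb, hmb⟩
      · -- even mask: HL0 applies
        have heq := Nat.xor_eq_zero_iff.mp hm0
        have := hl0 i j hij hjn heq
        omega
      · by_cases hbd : b = pvDv l[j]
        · -- flip of the last character: the even prefix one step earlier
          have hsucc := pvPm_take_succ l j hjn
          have hPmi : pvPm (l.take i) = pvPm (l.take j) := by
            have h2 : (pvPm (l.take i) ^^^ pvPm (l.take (j + 1))) ^^^ pvPm (l.take (j + 1))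
                = 2 ^ b ^^^ pvPm (l.take (j + 1)) := by rw [hmb]
            rw [Nat.xor_xor_cancel_right] at h2
            rw [h2, hsucc, pvPw, ← hbd, Nat.xor_comm (pvPm (l.take j)), ← Nat.xor_assoc,
              Nat.xor_self, Nat.zero_xor]
          rcases Nat.eq_or_lt_of_le hij with rfl | hij'
          · omega
          · have hj1 : j - 1 + 1 = j := by omega
            have := hl0 i (j - 1) (by omega) (by omega) (by rw [hj1]; exact hPmi)
            have hc1 : ((j - 1 : Nat) : Int) = (j : Int) - 1 := by omega
            rw [hc1] at this
            omega
        · -- flip elsewhere: HL1 applies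
          have := hl1 i j b hb hij hjn hjn hbd hmb
          omega
    exact le_min (by omega) hMn
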